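-- pv_equiv track=rewrite | github.com/tgrosman/gtfs2sumo | lib/gtfs2sumo.py | evaluate_shape_to_route_conversion
-- ===== SOURCE A (Python) =====
-- def evaluate_shape_to_route_conversion(
--     shapes: list[str],
--     remaining_faulty_routes: list[str],
--     shape_ids_non_mappable: list[str],
-- ) -> dict[str, int]:
--     """
--     Evaluates the conversion of shapes to routes by categorizing and counting them based on their status.
--
--     Parameters
--     ----------
--     shapes : list[str]
--         List of shape IDs that are considered for conversion.
--     remaining_faulty_routes : list[str]
--         List of shape IDs that have been identified as having faults.
--     shape_ids_non_mappable : list[str]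
--         List of shape IDs that correspond to non-mappable stops.
--
--     Returns
--     -------
--     dict[str, int]
--         A dictionary with counts of various categories:
--         - "total": Total number of shapes.
--         - "clean": Number of shapes that are neither faulty nor non-mappable.
--         - "remaining_faulty_routes": Number of shapes identified as faulty.
--         - "non_mappable_stops": Number of shapes that are non-mappable.
--     """
--     counts = {
--         "total": len(shapes),
--         "clean": sum(
--             1
--             for shape_id in shapes
--             if shape_id not in remaining_faulty_routes
--             and shape_id not in shape_ids_non_mappable
--         ),
--         "remaining_faulty_routes": sum(
--             1 for shape_id in shapes if shape_id in remaining_faulty_routes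
--         ),
--         "non_mappable_stops": sum(
--             1 for shape_id in shapes if shape_id in shape_ids_non_mappable
--         ),
--     }
--
--     return counts
-- ===== SOURCE B (Python) =====
-- def evaluate_shape_to_route_conversion(
--     shapes: list[str],
--     remaining_faulty_routes: list[str],
--     shape_ids_non_mappable: list[str],
-- ) -> dict[str, int]:
--     faulty_set = set(remaining_faulty_routes)
--     nonmap_set = set(shape_ids_non_mappable)
--     clean = faulty = nonmap = 0
--     for shape_id in shapes:
--         f = shape_id in faulty_set
--         n = shape_id in nonmap_set
--         if f:
--             faulty += 1
--         if n:
--             nonmap += 1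
--         if not f and not n:
--             clean += 1
--     return {
--         "total": len(shapes),
--         "clean": clean,
--         "remaining_faulty_routes": faulty,
--         "non_mappable_stops": nonmap,
--     }
-- ===== Notes on version B (the rewrite author's own statement) =====
-- stated objective: faster
-- what changed: Replace three separate scans of shapes with linear membership tests in lists by one single pass over shapes maintaining three independent counters, with the two membership lists pre-converted to hash sets.
import Mathlib
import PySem

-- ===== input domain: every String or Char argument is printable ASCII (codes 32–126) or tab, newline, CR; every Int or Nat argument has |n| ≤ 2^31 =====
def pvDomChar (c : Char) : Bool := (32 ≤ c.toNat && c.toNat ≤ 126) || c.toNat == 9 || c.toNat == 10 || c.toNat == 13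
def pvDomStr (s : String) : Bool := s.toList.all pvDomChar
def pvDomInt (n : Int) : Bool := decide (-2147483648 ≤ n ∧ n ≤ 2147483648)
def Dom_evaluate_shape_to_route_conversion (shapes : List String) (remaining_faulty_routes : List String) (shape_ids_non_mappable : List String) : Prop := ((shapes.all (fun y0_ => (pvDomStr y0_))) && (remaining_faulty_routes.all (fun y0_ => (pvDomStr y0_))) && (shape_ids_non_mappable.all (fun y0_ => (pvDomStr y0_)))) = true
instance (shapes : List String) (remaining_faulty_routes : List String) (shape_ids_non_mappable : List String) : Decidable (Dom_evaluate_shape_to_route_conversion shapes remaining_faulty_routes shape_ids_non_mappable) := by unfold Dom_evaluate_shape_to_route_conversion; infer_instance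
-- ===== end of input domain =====

-- ===== PORT A =====
-- Port of A: four entries built by separate passes over `shapes` (generator sums with list membership).
def evaluate_shape_to_route_conversion (shapes : List String) (remaining_faulty_routes : List String) (shape_ids_non_mappable : List String) : List (String × Int) :=
  [("total", (shapes.length : Int)),
   ("clean", shapes.foldl (fun acc shape_id =>
      if !(remaining_faulty_routes.contains shape_id) && !(shape_ids_non_mappable.contains shape_id)
      then acc + 1 else acc) 0),
   ("remaining_faulty_routes", shapes.foldl (fun acc shape_id =>
      if remaining_faulty_routes.contains shape_id then acc + 1 else acc) 0),
   ("non_mappable_stops", shapes.foldl (fun acc shape_id =>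
      if shape_ids_non_mappable.contains shape_id then acc + 1 else acc) 0)]

-- ===== PORT B =====
-- Port of B: build the two sets once, then ONE pass over `shapes` maintaining the three counters
-- (clean, faulty, nonmap) with three independent conditional increments.
def evaluate_shape_to_route_conversion_alt (shapes : List String) (remaining_faulty_routes : List String) (shape_ids_non_mappable : List String) : List (String × Int) :=
  let faulty_set := PySem.Set.ofList remaining_faulty_routes
  let nonmap_set := PySem.Set.ofList shape_ids_non_mappable
  let t := shapes.foldl (fun (acc : Int × Int × Int) shape_id =>
      let f := PySem.Set.contains faulty_set shape_id
      let n := PySem.Set.contains nonmap_set shape_id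
      (acc.1 + (if !f && !n then 1 else 0),
       acc.2.1 + (if f then 1 else 0),
       acc.2.2 + (if n then 1 else 0))) (0, 0, 0)
  [("total", (shapes.length : Int)),
   ("clean", t.1),
   ("remaining_faulty_routes", t.2.1),
   ("non_mappable_stops", t.2.2)]

-- ===== PRECONDITION & SPEC =====
def Spec_evaluate_shape_to_route_conversion (shapes : List String) (remaining_faulty_routes : List String) (shape_ids_non_mappable : List String) (out : List (String × Int)) : Prop := out = evaluate_shape_to_route_conversion_alt shapes remaining_faulty_routes shape_ids_non_mappable
instance (shapes : List String) (remaining_faulty_routes : List String) (shape_ids_non_mappable : List String) (out : List (String × Int)) : Decidable (Spec_evaluate_shape_to_route_conversion shapes remaining_faulty_routes shape_ids_non_mappable out) := by unfold Spec_evaluate_shape_to_route_conversion; infer_instance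

-- ===== CLAIM (what is proved, stated in full; the proofs are below) =====
def Claim_equal_evaluate_shape_to_route_conversion : Prop := ∀ (shapes : List String) (remaining_faulty_routes : List String) (shape_ids_non_mappable : List String), Dom_evaluate_shape_to_route_conversion shapes remaining_faulty_routes shape_ids_non_mappable → Spec_evaluate_shape_to_route_conversion shapes remaining_faulty_routes shape_ids_non_mappable (evaluate_shape_to_route_conversion shapes remaining_faulty_routes shape_ids_non_mappable)

-- ===== LEMMAS AND PROOFS =====

-- set(l) contains x exactly when the list l contains x
lemma contains_ofList_eq (l : List String) (x : String) :
    PySem.Set.contains (PySem.Set.ofList l) x = l.contains x := by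
  by_cases h : x ∈ l <;>
    simp [PySem.Set.contains_eq_listContains, PySem.Set.mem_ofList, h]

-- B's one-pass triple fold splits into A's three separate folds
lemma triple_fold_split (pf pn : String → Bool) (xs : List String) (a b c : Int) :
    xs.foldl (fun (acc : Int × Int × Int) s =>
        (acc.1 + (if !pf s && !pn s then 1 else 0),
         acc.2.1 + (if pf s then 1 else 0),
         acc.2.2 + (if pn s then 1 else 0))) (a, b, c)
      = (xs.foldl (fun acc s => if !pf s && !pn s then acc + 1 else acc) a,
         xs.foldl (fun acc s => if pf s then acc + 1 else acc) b,
         xs.foldl (fun acc s => if pn s then acc + 1 else acc) c) := by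
  induction xs generalizing a b c with
  | nil => rfl
  | cons x xs ih =>
    simp only [List.foldl_cons]
    rw [ih]
    cases hf : pf x <;> cases hn : pn x <;> simp_all

-- ===== VERDICT (by name: the statement is the Claim_ definition above) =====
theorem evaluate_shape_to_route_conversion_spec : Claim_equal_evaluate_shape_to_route_conversion := by
  intro shapes rf nm _
  show _ = _
  unfold evaluate_shape_to_route_conversion evaluate_shape_to_route_conversion_alt
  simp only [contains_ofList_eq, triple_fold_split]
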